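-- pv_equiv track=rewrite | github.com/sunxxuns/aiter | hsa/gfx950/fmha_v3_fwd_fp8/tools/tr8_base_fit.py | fit_affine_bit
-- ===== SOURCE A (Python) =====
-- from typing import Iterable, List, Set, Tuple
--
-- def fit_affine_bit(bases: List[int], lanes: int, bit: int, vars_count: int) -> Tuple[int, int, int]:
--     # brute force all 2^(vars_count+1) affine functions
--     best_acc = -1
--     best_mask = 0
--     best_c = 0
--     for mask in range(1 << vars_count):
--         for c in (0, 1):
--             acc = 0
--             for tid in range(lanes):
--                 val = c
--                 for i in range(vars_count):
--                     if (mask >> i) & 1: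
--                         val ^= (tid >> i) & 1
--                 bit_val = (bases[tid] >> bit) & 1
--                 if val == bit_val:
--                     acc += 1
--             if acc > best_acc:
--                 best_acc = acc
--                 best_mask = mask
--                 best_c = c
--     return best_acc, best_mask, best_c
-- ===== SOURCE B (Python) =====
-- def _parity(x):
--     p = 0
--     while x:
--         p ^= x & 1
--         x >>= 1
--     return p
--
--
-- def fit_affine_bit(bases, lanes, bit, vars_count):
--     # Aggregate all lanes once into signed tallies per low-bit residue class,
--     # then score every mask from the tallies alone (per-mask cost depends only
--     # on the number of distinct residues seen, never on the lane count).
--     size = 1 << vars_count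
--     tallies = {}
--     n = 0
--     for tid in range(lanes):
--         s = 1 - 2 * ((bases[tid] >> bit) & 1)
--         r = tid % size
--         tallies[r] = tallies.get(r, 0) + s
--         n += 1
--     best = (-1, 0, 0)
--     for mask in range(size):
--         w = 0
--         for r, t in tallies.items():
--             if _parity(mask & r):
--                 w -= t
--             else:
--                 w += t
--         acc0 = (n + w) // 2
--         if acc0 > best[0]:
--             best = (acc0, mask, 0)
--         if n - acc0 > best[0]:
--             best = (n - acc0, mask, 1)
--     return best
-- ===== Notes on version B (the rewrite author's own statement) =====
-- stated objective: alternative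
-- what changed: A rescans all lanes (with an inner per-bit loop) for every (mask, c) candidate; B makes one pass over the lanes to build a dict of signed tallies per low-bit residue class plus the lane count n, then scores each mask from the tallies alone and derives the c=1 score as n - acc0, so per-mask work depends on the number of distinct residues instead of the lane count.
import Mathlib
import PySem

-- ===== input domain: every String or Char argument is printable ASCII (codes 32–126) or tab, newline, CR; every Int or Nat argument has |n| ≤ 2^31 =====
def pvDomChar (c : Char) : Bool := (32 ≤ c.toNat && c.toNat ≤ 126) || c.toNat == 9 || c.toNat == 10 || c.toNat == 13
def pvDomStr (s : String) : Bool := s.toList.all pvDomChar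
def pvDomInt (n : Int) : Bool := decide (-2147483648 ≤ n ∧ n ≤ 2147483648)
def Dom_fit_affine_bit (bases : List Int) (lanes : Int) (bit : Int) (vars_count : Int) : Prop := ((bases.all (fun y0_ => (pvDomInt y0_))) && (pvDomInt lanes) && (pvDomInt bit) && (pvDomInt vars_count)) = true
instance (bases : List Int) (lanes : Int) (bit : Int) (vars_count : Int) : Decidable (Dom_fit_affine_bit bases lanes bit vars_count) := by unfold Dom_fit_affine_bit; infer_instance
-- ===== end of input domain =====

-- B replaces A's per-mask scan over all lanes by a single aggregation pass (signed
-- tallies per low-bit residue class) followed by per-mask scoring from the tallies,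
-- with the c = 1 score obtained as n - acc0 instead of a second scan.

-- Python `x >> k` / `x << k` (shift amounts are `.toNat` of ints that Pre_ keeps
-- nonnegative); core Lean's shifts are Python-exact here (see PYSEM.md)
def pyShr (x : Int) (k : Nat) : Int := x >>> k
def pyShl (x : Int) (k : Nat) : Int := x <<< k

-- ===== PORT A =====
def fit_affine_bit (bases : List Int) (lanes : Int) (bit : Int) (vars_count : Int) : Int × Int × Int :=
  -- best state is the triple (best_acc, best_mask, best_c)
  (PySem.List.pyRange 0 (pyShl 1 vars_count.toNat) 1).foldl (fun best mask =>
    [(0 : Int), 1].foldl (fun best c =>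
      let acc := (PySem.List.pyRange 0 lanes 1).foldl (fun acc tid =>
        let val := (PySem.List.pyRange 0 vars_count 1).foldl (fun val i =>
          if PySem.Int.band (pyShr mask i.toNat) 1 ≠ 0 then
            PySem.Int.bxor val (PySem.Int.band (pyShr tid i.toNat) 1)
          else val) c
        let bit_val := PySem.Int.band (pyShr (PySem.List.pyGetD bases tid 0) bit.toNat) 1
        if val = bit_val then acc + 1 else acc) 0
      if acc > best.1 then (acc, mask, c) else best) best) (-1, 0, 0)

-- ===== PORT B =====
-- Source B's `_parity`: while x: p ^= x & 1; x >>= 1.  Every call site passes a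
-- nonnegative int (mask & r with mask, r ≥ 0), so the loop is ported as the
-- corresponding Nat recursion (exact there; Python diverges on negatives).
def pvParity (p : Int) (x : Nat) : Int :=
  if x = 0 then p else pvParity (PySem.Int.bxor p ((x % 2 : Nat) : Int)) (x / 2)

def fit_affine_bit_alt (bases : List Int) (lanes : Int) (bit : Int) (vars_count : Int) : Int × Int × Int :=
  let size : Int := pyShl 1 vars_count.toNat
  -- one pass over the lanes: signed tallies per residue class, and the lane count n
  let st := (PySem.List.pyRange 0 lanes 1).foldl (fun (st : PySem.Dict Int Int × Int) tid =>
      let s : Int := 1 - 2 * PySem.Int.band (pyShr (PySem.List.pyGetD bases tid 0) bit.toNat) 1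
      let r := PySem.Int.mod tid size
      (st.1.insert r (st.1.getD r 0 + s), st.2 + 1))
    (PySem.Dict.empty, 0)
  let tallies := st.1
  let n := st.2
  (PySem.List.pyRange 0 size 1).foldl (fun best mask =>
    let w := tallies.items.foldl (fun w p =>
        if pvParity 0 (PySem.Int.band mask p.1).toNat ≠ 0 then w - p.2
        else w + p.2) 0
    let acc0 := PySem.Int.floordiv (n + w) 2
    let best := if acc0 > best.1 then (acc0, mask, (0 : Int)) else best
    if n - acc0 > best.1 then (n - acc0, mask, 1) else best) (-1, 0, 0)

-- ===== PRECONDITION & SPEC =====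
-- Pre_ excludes exactly the inputs where the Python A raises: a negative
-- vars_count (ValueError on 1 << vars_count), and — when the lane loop actually
-- runs (lanes > 0) — a negative bit (ValueError on >>) or lanes exceeding
-- len(bases) (IndexError on bases[tid]).
def Pre_fit_affine_bit (bases : List Int) (lanes : Int) (bit : Int) (vars_count : Int) : Prop :=
  0 ≤ vars_count ∧ (lanes ≤ 0 ∨ (0 ≤ bit ∧ lanes ≤ (bases.length : Int)))
instance (bases : List Int) (lanes : Int) (bit : Int) (vars_count : Int) : Decidable (Pre_fit_affine_bit bases lanes bit vars_count) := by unfold Pre_fit_affine_bit; infer_instance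

def pvWitness_fit_affine_bit : List Int × Int × Int × Int := ([3, 5, 6, 2], 4, 1, 2)

def Spec_fit_affine_bit (bases : List Int) (lanes : Int) (bit : Int) (vars_count : Int) (out : Int × Int × Int) : Prop := out = fit_affine_bit_alt bases lanes bit vars_count
instance (bases : List Int) (lanes : Int) (bit : Int) (vars_count : Int) (out : Int × Int × Int) : Decidable (Spec_fit_affine_bit bases lanes bit vars_count out) := by unfold Spec_fit_affine_bit; infer_instance

-- ===== CLAIM (what is proved, stated in full; the proofs are below) =====
def Claim_equal_fit_affine_bit : Prop := ∀ (bases : List Int) (lanes : Int) (bit : Int) (vars_count : Int), Dom_fit_affine_bit bases lanes bit vars_count → Pre_fit_affine_bit bases lanes bit vars_count → Spec_fit_affine_bit bases lanes bit vars_count (fit_affine_bit bases lanes bit vars_count)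

-- ===== LEMMAS AND PROOFS =====

-- the 0/1 value of bit `bit` of bases[tid], and its ±1 signed form
def pvBv (bases : List Int) (bit tid : Int) : Int :=
  PySem.Int.band (pyShr (PySem.List.pyGetD bases tid 0) bit.toNat) 1
def pvS (bases : List Int) (bit tid : Int) : Int := 1 - 2 * pvBv bases bit tid
-- χ(mask, r): parity of the common bits, exactly as B computes it
def pvChi (mask r : Int) : Int := pvParity 0 (PySem.Int.band mask r).toNat
-- signed contribution of one lane to B's w-score for a given mask
def pvG (bases : List Int) (bit mask tid : Int) : Int :=
  if pvChi mask tid ≠ 0 then -(pvS bases bit tid) else pvS bases bit tid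
-- B's inner w-loop over a tallies array
def pvW (mask : Int) (T : PySem.Dict Int Int) : Int :=
  T.items.foldl (fun w p =>
    if pvParity 0 (PySem.Int.band mask p.1).toNat ≠ 0 then w - p.2
    else w + p.2) 0
-- A's inner bit loop
def pvValFold (vars_count mask tid c : Int) : Int :=
  (PySem.List.pyRange 0 vars_count 1).foldl (fun val i =>
    if PySem.Int.band (pyShr mask i.toNat) 1 ≠ 0 then
      PySem.Int.bxor val (PySem.Int.band (pyShr tid i.toNat) 1)
    else val) c

lemma pvParity_zero_one (x : Nat) (p : Int) (hp : p = 0 ∨ p = 1) : pvParity p x = 0 ∨ pvParity p x = 1 := by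
  induction x using Nat.strong_induction_on generalizing p with
  | _ x ih =>
    rw [pvParity]
    split
    · exact hp
    · rename_i hx
      apply ih (x / 2) (Nat.div_lt_self (Nat.pos_of_ne_zero hx) (by norm_num))
      have h2 : x % 2 = 0 ∨ x % 2 = 1 := by omega
      rcases hp with hp | hp <;> rcases h2 with h2 | h2 <;> simp [hp, h2] <;> decide

lemma pvParity_acc (p : Int) (x : Nat) (hp : p = 0 ∨ p = 1) :
    pvParity p x = PySem.Int.bxor p (pvParity 0 x) := by
  induction x using Nat.strong_induction_on generalizing p with
  | _ x ih =>
    conv_lhs => rw [pvParity]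
    conv_rhs => rw [pvParity]
    split
    · rcases hp with hp | hp <;> simp [hp] <;> decide
    · rename_i hx
      have hd := Nat.div_lt_self (Nat.pos_of_ne_zero hx) (show 1 < 2 by norm_num)
      have h2 : x % 2 = 0 ∨ x % 2 = 1 := by omega
      have hb : ∀ q : Int, q = 0 ∨ q = 1 → PySem.Int.bxor q ((x % 2 : Nat) : Int) = 0 ∨ PySem.Int.bxor q ((x % 2 : Nat) : Int) = 1 := by
        intro q hq; rcases hq with hq | hq <;> rcases h2 with h2 | h2 <;> simp [hq, h2] <;> decide
      rw [ih (x / 2) hd _ (hb p hp), ih (x / 2) hd _ (hb 0 (Or.inl rfl))]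
      have hpar := pvParity_zero_one (x / 2) 0 (Or.inl rfl)
      rcases hp with hp | hp <;> rcases h2 with h2 | h2 <;> rcases hpar with hq | hq <;>
        rw [hq] <;> simp [hp, h2] <;> decide

lemma pvParity_rec (x : Nat) :
    pvParity 0 x = PySem.Int.bxor ((x % 2 : Nat) : Int) (pvParity 0 (x / 2)) := by
  by_cases hx : x = 0
  · subst hx; rw [pvParity]; simp [pvParity]
  · conv_lhs => rw [pvParity]
    simp only [hx, if_false]
    have h2 : x % 2 = 0 ∨ x % 2 = 1 := by omega
    rw [pvParity_acc _ _ (by rcases h2 with h2 | h2 <;> simp [h2] <;> decide)]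
    rw [PySem.Int.bxor_comm 0, PySem.Int.bxor_zero]

lemma band_mod_pow (v m t : Nat) (hm : m < 2 ^ v) : m &&& t = m &&& (t % 2 ^ v) := by
  apply Nat.eq_of_testBit_eq
  intro i
  simp only [Nat.testBit_and, Nat.testBit_mod_two_pow]
  by_cases hi : i < v
  · simp [hi]
  · have : m.testBit i = false := by
      apply Nat.testBit_lt_two_pow
      calc m < 2 ^ v := hm
        _ ≤ 2 ^ i := Nat.pow_le_pow_right (by norm_num) (by omega)
    simp [this]

lemma pvBv_zero_one (bases : List Int) (bit tid : Int) :
    PySem.Int.band (pyShr (PySem.List.pyGetD bases tid 0) bit.toNat) 1 = 0 ∨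
    PySem.Int.band (pyShr (PySem.List.pyGetD bases tid 0) bit.toNat) 1 = 1 := by
  rw [PySem.Int.band_one, PySem.Int.mod_eq_emod_of_pos (by norm_num)]
  omega

lemma val_fold (v : Nat) (m t : Nat) (c : Int) (hm : m < 2 ^ v) (hc : c = 0 ∨ c = 1) :
    (List.range v).foldl (fun (val : Int) (i : Nat) =>
        if PySem.Int.band ((m : Int) >>> i) 1 ≠ 0 then
          PySem.Int.bxor val (PySem.Int.band ((t : Int) >>> i) 1)
        else val) c
      = PySem.Int.bxor c (pvParity 0 (m &&& t)) := by
  induction v generalizing m t c with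
  | zero =>
    interval_cases m
    simp only [List.range_zero, List.foldl_nil]
    rcases hc with hc | hc <;> rw [hc] <;> simp [pvParity] <;> decide
  | succ v ih =>
    rw [List.range_succ_eq_map, List.foldl_cons, List.foldl_map]
    have cast_shift : ∀ (a : Nat) (i : Nat), ((a : Int) >>> i) = (((a >>> i : Nat) : Nat) : Int) := by
      intro a i; simp
    -- step with i = 0
    set c1 : Int := (if PySem.Int.band ((m : Int) >>> (0 : Nat)) 1 ≠ 0 then
          PySem.Int.bxor c (PySem.Int.band ((t : Int) >>> (0 : Nat)) 1) else c) with hc1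
    have hm2 : m / 2 < 2 ^ v := by
      have := hm; rw [pow_succ] at this; omega
    have hb : ∀ (a : Nat) (i : Nat), PySem.Int.band ((a : Int) >>> (i+1)) 1 = PySem.Int.band (((a/2 : Nat) : Int) >>> i) 1 := by
      intro a i
      rw [cast_shift, cast_shift]
      norm_cast
      rw [Nat.shiftRight_succ_inside]
    have hstep : ∀ (val : Int) (i : Nat),
        (if PySem.Int.band ((m : Int) >>> (i+1)) 1 ≠ 0 then
          PySem.Int.bxor val (PySem.Int.band ((t : Int) >>> (i+1)) 1) else val)
        = (if PySem.Int.band (((m/2 : Nat) : Int) >>> i) 1 ≠ 0 then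
          PySem.Int.bxor val (PySem.Int.band (((t/2 : Nat) : Int) >>> i) 1) else val) := by
      intro val i; rw [hb m i, hb t i]
    have hc1' : c1 = 0 ∨ c1 = 1 := by
      rw [hc1]
      split
      · rcases hc with hc | hc <;>
          rcases (show PySem.Int.band ((t : Int) >>> (0 : Nat)) 1 = 0 ∨ PySem.Int.band ((t : Int) >>> (0 : Nat)) 1 = 1 by
            rw [PySem.Int.band_one, PySem.Int.mod_eq_emod_of_pos (by norm_num)]; omega) with h | h <;>
          rw [hc, h] <;> first | (left; decide) | (right; decide)
      · exact hc
    calc (List.range v).foldl (fun (val : Int) (i : Nat) =>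
          if PySem.Int.band ((m : Int) >>> (i+1)) 1 ≠ 0 then
            PySem.Int.bxor val (PySem.Int.band ((t : Int) >>> (i+1)) 1) else val) c1
        = (List.range v).foldl (fun (val : Int) (i : Nat) =>
          if PySem.Int.band (((m/2 : Nat) : Int) >>> i) 1 ≠ 0 then
            PySem.Int.bxor val (PySem.Int.band (((t/2 : Nat) : Int) >>> i) 1) else val) c1 := by
          apply PySem.List.foldl_congr_mem
          intro acc x _; exact hstep acc x
      _ = PySem.Int.bxor c1 (pvParity 0 ((m/2) &&& (t/2))) := ih (m/2) (t/2) c1 hm2 hc1'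
      _ = PySem.Int.bxor c (pvParity 0 (m &&& t)) := by
          have hhalf : (m &&& t) / 2 = (m/2) &&& (t/2) := by
            have := @Nat.shiftRight_and_distrib 1 m t
            simpa [Nat.shiftRight_succ, Nat.shiftRight_zero] using this
          rw [pvParity_rec (m &&& t), hhalf]
          have hmod : (m &&& t) % 2 = m % 2 * (t % 2) := by
            have h0 : (m &&& t).testBit 0 = (m.testBit 0 && t.testBit 0) := Nat.testBit_and m t 0
            have h0' : ((m &&& t) % 2 = 1) ↔ (m % 2 = 1 ∧ t % 2 = 1) := by
              simpa [Nat.testBit_zero] using h0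
            have h1 : m % 2 = 0 ∨ m % 2 = 1 := by omega
            have h2 : t % 2 = 0 ∨ t % 2 = 1 := by omega
            rcases h1 with h1 | h1 <;> rcases h2 with h2 | h2 <;> rw [h1, h2] <;> omega
          have hbm : PySem.Int.band ((m : Int) >>> (0 : Nat)) 1 = ((m % 2 : Nat) : Int) := by
            rw [cast_shift, PySem.Int.band_one, Nat.shiftRight_zero]
            exact_mod_cast PySem.Int.mod_natCast m 2
          have hbt : PySem.Int.band ((t : Int) >>> (0 : Nat)) 1 = ((t % 2 : Nat) : Int) := by
            rw [cast_shift, PySem.Int.band_one, Nat.shiftRight_zero]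
            exact_mod_cast PySem.Int.mod_natCast t 2
          have hpar := pvParity_zero_one ((m/2) &&& (t/2)) 0 (Or.inl rfl)
          rw [hc1, hbm, hbt, hmod]
          have h1 : m % 2 = 0 ∨ m % 2 = 1 := by omega
          have h2 : t % 2 = 0 ∨ t % 2 = 1 := by omega
          rcases hc with hc | hc <;> rcases h1 with h1 | h1 <;> rcases h2 with h2 | h2 <;>
            rcases hpar with hp | hp <;> rw [hc, h1, h2, hp] <;> norm_num <;> decide


lemma pvChi_zero_one (mask r : Int) : pvChi mask r = 0 ∨ pvChi mask r = 1 :=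
  pvParity_zero_one _ 0 (Or.inl rfl)

lemma pvBv01 (bases : List Int) (bit tid : Int) : pvBv bases bit tid = 0 ∨ pvBv bases bit tid = 1 :=
  pvBv_zero_one bases bit tid

-- A's bit loop as c ⊕ χ(mask, tid), for in-range mask and nonnegative tid
lemma pvValFold_eq (v : Nat) (mask tid c : Int) (hm0 : 0 ≤ mask) (hm : mask < 2 ^ v)
    (ht : 0 ≤ tid) (hc : c = 0 ∨ c = 1) :
    pvValFold (v : Int) mask tid c = PySem.Int.bxor c (pvChi mask tid) := by
  obtain ⟨m, rfl⟩ : ∃ m : Nat, mask = (m : Int) := ⟨mask.toNat, by omega⟩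
  obtain ⟨t, rfl⟩ : ∃ t : Nat, tid = (t : Int) := ⟨tid.toNat, by omega⟩
  have hmv : m < 2 ^ v := by exact_mod_cast hm
  unfold pvValFold pvChi
  rw [PySem.List.pyRange_zero_nat, List.foldl_map]
  have hband : PySem.Int.band (m : Int) (t : Int) = ((m &&& t : Nat) : Int) := by
    rw [PySem.Int.band_of_nonneg (by positivity) (by positivity)]
    simp
  rw [hband]
  simp only [Int.toNat_natCast]
  have := val_fold v m t c hmv hc
  simpa using this

-- χ only depends on tid's low bits when mask < 2^v
lemma pvChi_mod (v : Nat) (mask tid : Int) (hm0 : 0 ≤ mask) (hm : mask < 2 ^ v) (ht : 0 ≤ tid) :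
    pvChi mask (PySem.Int.mod tid ((2 : Int) ^ v)) = pvChi mask tid := by
  obtain ⟨m, rfl⟩ : ∃ m : Nat, mask = (m : Int) := ⟨mask.toNat, by omega⟩
  obtain ⟨t, rfl⟩ : ∃ t : Nat, tid = (t : Int) := ⟨tid.toNat, by omega⟩
  have hmv : m < 2 ^ v := by exact_mod_cast hm
  have hmod : PySem.Int.mod (t : Int) ((2 : Int) ^ v) = ((t % 2 ^ v : Nat) : Int) := by
    have := PySem.Int.mod_natCast t (2 ^ v)
    simpa using this
  unfold pvChi
  rw [hmod, PySem.Int.band_of_nonneg (by positivity) (by positivity),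
      PySem.Int.band_of_nonneg (by positivity) (by positivity)]
  simp only [Int.toNat_natCast]
  rw [← band_mod_pow v m t hmv]

-- B's w-loop as a sum over the residue range
lemma pvW_sum (mask : Int) (T : PySem.Dict Int Int) :
    pvW mask T = (T.items.map (fun p =>
      if pvParity 0 (PySem.Int.band mask p.1).toNat ≠ 0 then -(p.2 : Int)
      else p.2)).sum := by
  unfold pvW
  rw [PySem.List.foldl_congr_mem _ _ (fun (w : Int) (p : Int × Int) => w +
      (if pvParity 0 (PySem.Int.band mask p.1).toNat ≠ 0 then -(p.2 : Int)
       else p.2)) 0 (by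
    intro acc x _
    by_cases h : pvParity 0 (PySem.Int.band mask x.1).toNat ≠ 0
    · simp only [if_pos h]; try ring
    · simp only [if_neg h]; try ring)]
  rw [PySem.List.foldl_add]
  ring

-- inserting the updated value for one key shifts the w-score by its signed contribution
lemma pvW_update (mask : Int) (T : PySem.Dict Int Int) (j s : Int) (hnd : T.keys.Nodup) :
    pvW mask (T.insert j (T.getD j 0 + s)) =
      pvW mask T + (if pvChi mask j ≠ 0 then -s else s) := by
  unfold pvChi
  rw [pvW_sum, pvW_sum]
  by_cases hc : T.contains j = true
  · -- j already present: its unique entry is replaced in place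
    obtain ⟨v, hv⟩ : ∃ v, T.get? j = some v := by
      have := PySem.Dict.contains_eq_isSome_get? T j
      rw [hc] at this
      exact Option.isSome_iff_exists.mp this.symm
    have hgd : T.getD j 0 = v := PySem.Dict.getD_of_get?_eq_some T 0 hv
    obtain ⟨pre, post, hsplit⟩ := List.mem_iff_append.mp (PySem.Dict.mem_items_of_get?_eq_some T hv)
    have hkeys : (T.items.map (fun p => p.1)).Nodup := hnd
    have hksplit : (pre.map (fun p => (p : Int × Int).1) ++ j :: post.map (fun p => p.1)).Nodup := by
      have := hkeys
      rw [hsplit] at this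
      simpa using this
    rcases List.nodup_append.mp hksplit with ⟨-, hnd2, hdisj⟩
    have hpre : ∀ q ∈ pre, (q : Int × Int).1 ≠ j := by
      intro q hq hqj
      have hq1 : q.1 ∈ pre.map (fun p => (p : Int × Int).1) := List.mem_map_of_mem hq
      exact hdisj q.1 hq1 j List.mem_cons_self hqj
    have hpost : ∀ q ∈ post, (q : Int × Int).1 ≠ j := by
      intro q hq hqj
      have hq1 : q.1 ∈ post.map (fun p => (p : Int × Int).1) := List.mem_map_of_mem hq
      exact (List.nodup_cons.mp hnd2).1 (by rw [← hqj]; exact hq1)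
    rw [PySem.Dict.items_insert_of_contains T _ hc, hsplit]
    simp only [List.map_append, List.map_cons, List.sum_append, List.sum_cons]
    have hmappre : pre.map ((fun p => if pvParity 0 (PySem.Int.band mask p.1).toNat ≠ 0
          then -(p.2 : Int) else p.2) ∘ (fun p => if (p.1 == j) = true then (j, T.getD j 0 + s) else p))
        = pre.map (fun p => if pvParity 0 (PySem.Int.band mask p.1).toNat ≠ 0
          then -(p.2 : Int) else p.2) := by
      apply List.map_congr_left
      intro q hq
      have : (q.1 == j) = false := beq_eq_false_iff_ne.mpr (hpre q hq)
      simp [Function.comp, this]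
    have hmappost : post.map ((fun p => if pvParity 0 (PySem.Int.band mask p.1).toNat ≠ 0
          then -(p.2 : Int) else p.2) ∘ (fun p => if (p.1 == j) = true then (j, T.getD j 0 + s) else p))
        = post.map (fun p => if pvParity 0 (PySem.Int.band mask p.1).toNat ≠ 0
          then -(p.2 : Int) else p.2) := by
      apply List.map_congr_left
      intro q hq
      have : (q.1 == j) = false := beq_eq_false_iff_ne.mpr (hpost q hq)
      simp [Function.comp, this]
    rw [List.map_map, List.map_map, hmappre, hmappost]
    have hjj : ((j == j) = true) := by simp
    simp only [hjj, if_pos, hgd]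
    split <;> ring
  · -- j is a fresh key: its entry is appended and getD j 0 = 0
    have hc' : T.contains j = false := by simpa using hc
    rw [PySem.Dict.items_insert_of_not_contains T _ hc',
        PySem.Dict.getD_of_not_contains T 0 hc']
    simp only [List.map_append, List.sum_append, List.map_cons, List.map_nil, List.sum_cons,
      List.sum_nil]
    split <;> ring

-- B's aggregation step, named for the proofs
def pvStepB (bases : List Int) (bit size : Int) (st : PySem.Dict Int Int × Int) (tid : Int) :
    PySem.Dict Int Int × Int :=
  let s : Int := 1 - 2 * PySem.Int.band (pyShr (PySem.List.pyGetD bases tid 0) bit.toNat) 1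
  let r := PySem.Int.mod tid size
  (st.1.insert r (st.1.getD r 0 + s), st.2 + 1)

-- the aggregation pass: length, lane count and w-score of the resulting tallies
lemma tallies_fold (bases : List Int) (bit size : Int) (hsz : 0 < size)
    (L : List Int) (T0 : PySem.Dict Int Int) (n0 : Int) (hnd : T0.keys.Nodup)
    (hL : ∀ tid ∈ L, 0 ≤ tid) :
    (L.foldl (pvStepB bases bit size) (T0, n0)).2 = n0 + L.length ∧
    (∀ mask : Int, pvW mask (L.foldl (pvStepB bases bit size) (T0, n0)).1 = pvW mask T0 +
      (L.map (fun tid => if pvChi mask (PySem.Int.mod tid size) ≠ 0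
        then -(pvS bases bit tid) else pvS bases bit tid)).sum) := by
  induction L generalizing T0 n0 with
  | nil => simp
  | cons tid L ih =>
    have htid : 0 ≤ tid := hL tid (List.mem_cons_self)
    have hL' : ∀ t ∈ L, 0 ≤ t := fun t ht => hL t (List.mem_cons_of_mem _ ht)
    have hmod0 : 0 ≤ PySem.Int.mod tid size := by
      rw [PySem.Int.mod_eq_emod_of_pos hsz]; exact Int.emod_nonneg tid (by omega)
    have hmods : PySem.Int.mod tid size < size := by
      rw [PySem.Int.mod_eq_emod_of_pos hsz]; exact Int.emod_lt_of_pos tid hsz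
    simp only [List.foldl_cons]
    have hnd1 : (pvStepB bases bit size (T0, n0) tid).1.keys.Nodup := by
      simp only [pvStepB]
      exact PySem.Dict.nodup_keys_insert _ _ _ hnd
    obtain ⟨ih2, ih3⟩ := ih (pvStepB bases bit size (T0, n0) tid).1 (pvStepB bases bit size (T0, n0) tid).2 hnd1 hL'
    refine ⟨?_, ?_⟩
    · rw [ih2]
      simp only [pvStepB, List.length_cons]
      push_cast
      ring
    · intro mask
      rw [ih3 mask]
      simp only [pvStepB]
      rw [pvW_update mask T0 _ _ hnd]
      simp only [List.map_cons, List.sum_cons]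
      unfold pvS pvBv
      ring

-- A's lane loop for c = 0 and c = 1, against the signed sum
lemma accA_count (bases : List Int) (bit : Int) (v : Nat) (mask : Int)
    (hm0 : 0 ≤ mask) (hm : mask < 2 ^ v)
    (L : List Int) (hL : ∀ tid ∈ L, 0 ≤ tid) (a : Int) (c : Int) (hc : c = 0 ∨ c = 1) :
    2 * (L.foldl (fun acc tid =>
        if pvValFold (v : Int) mask tid c = pvBv bases bit tid then acc + 1 else acc) a)
      = 2 * a + L.length + (if c = 0 then 1 else -1) *
        (L.map (fun tid => pvG bases bit mask tid)).sum := by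
  revert hL
  induction L generalizing a with
  | nil => intro hL; simp
  | cons tid L ih =>
    intro hL
    have htid : 0 ≤ tid := hL tid (List.mem_cons_self)
    have hL' : ∀ t ∈ L, 0 ≤ t := fun t ht => hL t (List.mem_cons_of_mem _ ht)
    simp only [List.foldl_cons, List.map_cons, List.sum_cons, List.length_cons]
    rw [ih _ hL']
    have hval := pvValFold_eq v mask tid c hm0 hm htid hc
    have hchi := pvChi_zero_one mask tid
    have hbv := pvBv01 bases bit tid
    have hG : pvG bases bit mask tid = if pvChi mask tid ≠ 0 then -(pvS bases bit tid) else pvS bases bit tid := rfl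
    have hS : pvS bases bit tid = 1 - 2 * pvBv bases bit tid := rfl
    have key : 2 * (if pvValFold (v : Int) mask tid c = pvBv bases bit tid then a + 1 else a)
        = 2 * a + 1 + (if c = 0 then 1 else -1) * pvG bases bit mask tid := by
      have hx00 : PySem.Int.bxor (0 : Int) 0 = 0 := by decide
      have hx01 : PySem.Int.bxor (0 : Int) 1 = 1 := by decide
      have hx10 : PySem.Int.bxor (1 : Int) 0 = 1 := by decide
      have hx11 : PySem.Int.bxor (1 : Int) 1 = 0 := by decide
      rw [hval, hG, hS]
      rcases hc with hc | hc <;> rcases hchi with h1 | h1 <;> rcases hbv with h2 | h2 <;>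
        rw [hc, h1, h2] <;> simp only [hx00, hx01, hx10, hx11] <;> split_ifs <;> omega
    rw [key]
    push_cast
    ring

-- A's lane-count as a named function of (mask, c)
def pvAccA (bases : List Int) (bit vars_count mask c : Int) (L : List Int) : Int :=
  L.foldl (fun acc tid =>
    if pvValFold vars_count mask tid c = pvBv bases bit tid then acc + 1 else acc) 0

lemma pvAccA_eq (bases : List Int) (bit : Int) (v : Nat) (mask : Int)
    (hm0 : 0 ≤ mask) (hm : mask < 2 ^ v)
    (L : List Int) (hL : ∀ tid ∈ L, 0 ≤ tid) (c : Int) (hc : c = 0 ∨ c = 1) :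
    2 * pvAccA bases bit (v : Int) mask c L
      = L.length + (if c = 0 then 1 else -1) * (L.map (fun tid => pvG bases bit mask tid)).sum := by
  unfold pvAccA
  have := accA_count bases bit v mask hm0 hm L hL 0 c hc
  rw [this]
  ring

-- the empty tallies dict scores 0 for every mask
lemma pvW_empty (mask : Int) : pvW mask PySem.Dict.empty = 0 := rfl

-- ===== VERDICT (by name: the statement is the Claim_ definition above) =====
theorem fit_affine_bit_spec : Claim_equal_fit_affine_bit := by
  intro bases lanes bit vars_count _ hpre
  obtain ⟨hv, -⟩ := hpre
  unfold Spec_fit_affine_bit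
  set v : Nat := vars_count.toNat with hvdef
  have hvc : ((v : Nat) : Int) = vars_count := Int.toNat_of_nonneg hv
  have h2v : (pyShl 1 v) = (2 : Int) ^ v := by simp [pyShl, Int.shiftLeft_eq]
  have hszpos : (0 : Int) < (2 : Int) ^ v := by positivity
  -- both ports, re-stated through the named helper functions (definitional)
  have hA : fit_affine_bit bases lanes bit vars_count =
      (PySem.List.pyRange 0 (pyShl 1 v) 1).foldl (fun best mask =>
        [(0 : Int), 1].foldl (fun best c =>
          if pvAccA bases bit vars_count mask c (PySem.List.pyRange 0 lanes 1) > best.1 then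
            (pvAccA bases bit vars_count mask c (PySem.List.pyRange 0 lanes 1), mask, c)
          else best) best) (-1, 0, 0) := by rfl
  have hB : fit_affine_bit_alt bases lanes bit vars_count =
      (PySem.List.pyRange 0 (pyShl 1 v) 1).foldl (fun best mask =>
        let st := (PySem.List.pyRange 0 lanes 1).foldl (pvStepB bases bit (pyShl 1 v))
          (PySem.Dict.empty, 0)
        let w := pvW mask st.1
        let acc0 := PySem.Int.floordiv (st.2 + w) 2
        let best := if acc0 > best.1 then (acc0, mask, (0 : Int)) else best
        if st.2 - acc0 > best.1 then (st.2 - acc0, mask, 1) else best) (-1, 0, 0) := by rfl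
  rw [hA, hB, h2v]
  set L : List Int := PySem.List.pyRange 0 lanes 1 with hLdef
  have hL : ∀ tid ∈ L, 0 ≤ tid := by
    intro tid ht
    exact (PySem.List.mem_pyRange_one.mp ht).1
  obtain ⟨hn, hw⟩ := tallies_fold bases bit ((2 : Int) ^ v) hszpos L
    PySem.Dict.empty 0 PySem.Dict.nodup_keys_empty hL
  apply PySem.List.foldl_congr_mem
  intro best mask hmem
  obtain ⟨hm0, hms⟩ := PySem.List.mem_pyRange_one.mp hmem
  simp only [List.foldl_cons, List.foldl_nil]
  have hS : ∀ tid ∈ L, (if pvChi mask (PySem.Int.mod tid ((2 : Int) ^ v)) ≠ 0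
      then -(pvS bases bit tid) else pvS bases bit tid) = pvG bases bit mask tid := by
    intro tid ht
    rw [pvChi_mod v mask tid hm0 hms (hL tid ht)]
    rfl
  have hwm : pvW mask
      ((L.foldl (pvStepB bases bit ((2 : Int) ^ v)) (PySem.Dict.empty, 0)).1)
      = (L.map (fun tid => pvG bases bit mask tid)).sum := by
    rw [hw mask, pvW_empty, List.map_congr_left hS]
    ring
  have h0 : 2 * pvAccA bases bit vars_count mask 0 L
      = L.length + (L.map (fun tid => pvG bases bit mask tid)).sum := by
    have := pvAccA_eq bases bit v mask hm0 hms L hL 0 (Or.inl rfl)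
    rw [hvc] at this
    simpa using this
  have h1 : 2 * pvAccA bases bit vars_count mask 1 L
      = L.length - (L.map (fun tid => pvG bases bit mask tid)).sum := by
    have := pvAccA_eq bases bit v mask hm0 hms L hL 1 (Or.inr rfl)
    rw [hvc] at this
    rw [this, if_neg (by norm_num)]
    ring
  have hacc0 : PySem.Int.floordiv
      ((L.foldl (pvStepB bases bit ((2 : Int) ^ v)) (PySem.Dict.empty, 0)).2
        + pvW mask
          ((L.foldl (pvStepB bases bit ((2 : Int) ^ v)) (PySem.Dict.empty, 0)).1)) 2
      = pvAccA bases bit vars_count mask 0 L := by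
    rw [hn, hwm, PySem.Int.floordiv_eq_ediv_of_pos (by norm_num)]
    omega
  have hacc1 : (L.foldl (pvStepB bases bit ((2 : Int) ^ v)) (PySem.Dict.empty, 0)).2
      - pvAccA bases bit vars_count mask 0 L = pvAccA bases bit vars_count mask 1 L := by
    rw [hn]
    omega
  simp only [hacc0, hacc1]
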